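-- pv_equiv track=rewrite | github.com/helyio-dev/codingame | puzzle/easy/Bijective Numeration/Python.py | decimal_to_decimary
-- ===== SOURCE A (Python) =====
-- def decimal_to_decimary(n):
--     if n == 0:
--         return ''
--     digits = []
--     while n > 0:
--         rem = n % 10
--         if rem == 0:
--             rem = 10
--             n -= 10
--         if rem == 10:
--             digits.append('A')
--         else:
--             digits.append(str(rem))
--         n //= 10
--     return ''.join(digits[::-1])
-- ===== SOURCE B (Python) =====
-- def decimal_to_decimary(n):
--     if n <= 0:
--         return ''
--     q, r = divmod(n - 1, 10)
--     return decimal_to_decimary(q) + ('A' if r == 9 else str(r + 1))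
-- ===== Notes on version B (the rewrite author's own statement) =====
-- stated objective: simpler
-- what changed: Uses the bijective-numeration identity divmod(n-1,10), which removes A's zero-remainder special case (rem=10, n-=10), and builds the string by recursion on the quotient instead of appending digits to a list and reversing it.
import Mathlib
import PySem

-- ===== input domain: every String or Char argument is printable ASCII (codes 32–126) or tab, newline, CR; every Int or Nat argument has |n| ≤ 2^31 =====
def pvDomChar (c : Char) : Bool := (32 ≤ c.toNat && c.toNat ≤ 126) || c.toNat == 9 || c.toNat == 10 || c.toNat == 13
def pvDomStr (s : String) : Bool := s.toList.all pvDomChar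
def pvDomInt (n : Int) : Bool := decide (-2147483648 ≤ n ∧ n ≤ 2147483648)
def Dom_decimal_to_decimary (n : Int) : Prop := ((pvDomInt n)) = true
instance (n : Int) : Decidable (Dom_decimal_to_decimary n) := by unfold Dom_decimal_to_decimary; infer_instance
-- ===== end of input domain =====

-- B replaces A's digit loop (zero-remainder special case, digit list, [::-1] reversal)
-- by recursion on divmod(n-1, 10), prepending each digit; same cost, simpler decomposition.


-- ===== PORT A =====
-- the 'while n > 0' loop, carrying (n, digits); one digit string appended per step.
-- fuel is only a totality guard: each step strictly decreases n, so fuel = n.toNat suffices.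
-- 'if rem == 0: rem = 10; n -= 10' is the dependent branch: in it rem is 10, so the
-- 'if rem == 10' test appends 'A'; in the other branch rem = n % 10 is kept.
def pvLoopA (fuel : Nat) (n : Int) (digits : List String) : List String :=
  match fuel with
  | 0 => digits
  | fuel + 1 =>
    if n > 0 then
      if PySem.Int.mod n 10 = 0 then
        pvLoopA fuel (PySem.Int.floordiv (n - 10) 10)
          (digits ++ [if (10 : Int) = 10 then "A" else PySem.Int.toStr 10])
      else
        pvLoopA fuel (PySem.Int.floordiv n 10)
          (digits ++ [if PySem.Int.mod n 10 = 10 then "A" else PySem.Int.toStr (PySem.Int.mod n 10)])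
    else digits

def decimal_to_decimary (n : Int) : String :=
  if n = 0 then "" else
    PySem.Str.join "" ((PySem.List.slice? (pvLoopA n.toNat n []) none none (-1)).getD [])  -- ''.join(digits[::-1])

-- ===== PORT B =====
-- fuel is only a totality guard: the recursion is on q = (n-1) // 10 < n, so fuel = n.toNat suffices
def pvAltGo (fuel : Nat) (n : Int) : String :=
  match fuel with
  | 0 => ""
  | fuel + 1 =>
    if n ≤ 0 then "" else
      pvAltGo fuel (PySem.Int.floordiv (n - 1) 10) ++
        (if PySem.Int.mod (n - 1) 10 = 9 then "A" else PySem.Int.toStr (PySem.Int.mod (n - 1) 10 + 1))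

def decimal_to_decimary_alt (n : Int) : String := pvAltGo n.toNat n

-- ===== PRECONDITION & SPEC =====
def Spec_decimal_to_decimary (n : Int) (out : String) : Prop := out = decimal_to_decimary_alt n
instance (n : Int) (out : String) : Decidable (Spec_decimal_to_decimary n out) := by unfold Spec_decimal_to_decimary; infer_instance

-- ===== CLAIM (what is proved, stated in full; the proofs are below) =====
def Claim_equal_decimal_to_decimary : Prop := ∀ (n : Int), Dom_decimal_to_decimary n → Spec_decimal_to_decimary n (decimal_to_decimary n)

-- ===== LEMMAS AND PROOFS =====

lemma pv_intercalate_nil (l : List (List Char)) : ([] : List Char).intercalate l = l.flatten := by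
  induction l with
  | nil => simp [List.intercalate]
  | cons a t ih => cases t <;> simp_all [List.intercalate, List.intersperse, List.flatten]

lemma pv_join_cons (d : String) (l : List String) :
    PySem.Str.join "" (d :: l) = d ++ PySem.Str.join "" l := by
  simp [PySem.Str.join, PySem.Chars.join, pv_intercalate_nil]

lemma pv_join_nil : PySem.Str.join "" ([] : List String) = "" := by decide

-- one step of A's loop produces B's digit and B's next quotient
lemma pv_step_rem_zero (n : Int) (h : 0 < n) (hr : PySem.Int.mod n 10 = 0) :
    PySem.Int.mod (n - 1) 10 = 9 ∧ PySem.Int.floordiv (n - 10) 10 = PySem.Int.floordiv (n - 1) 10 := by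
  rw [PySem.Int.mod_eq_emod_of_pos (by omega)] at hr
  rw [PySem.Int.mod_eq_emod_of_pos (by omega), PySem.Int.floordiv_eq_ediv_of_pos (by omega),
    PySem.Int.floordiv_eq_ediv_of_pos (by omega)]
  omega

lemma pv_step_rem_ne (n : Int) (h : 0 < n) (hr : PySem.Int.mod n 10 ≠ 0) :
    PySem.Int.mod (n - 1) 10 ≠ 9 ∧ PySem.Int.mod (n - 1) 10 + 1 = PySem.Int.mod n 10 ∧
      PySem.Int.floordiv n 10 = PySem.Int.floordiv (n - 1) 10 := by
  rw [PySem.Int.mod_eq_emod_of_pos (by omega)] at hr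
  rw [PySem.Int.mod_eq_emod_of_pos (by omega), PySem.Int.mod_eq_emod_of_pos (by omega),
    PySem.Int.floordiv_eq_ediv_of_pos (by omega), PySem.Int.floordiv_eq_ediv_of_pos (by omega)]
  refine ⟨?_, ?_, ?_⟩ <;> omega

-- the next value of n in either branch of A's loop strictly decreases and stays ≥ 0 fuel-wise
lemma pv_next_lt_zero (n : Int) (h : 0 < n) (hr : PySem.Int.mod n 10 = 0) :
    (PySem.Int.floordiv (n - 10) 10).toNat < n.toNat := by
  rw [PySem.Int.floordiv_eq_ediv_of_pos (by omega)]
  rw [PySem.Int.mod_eq_emod_of_pos (by omega)] at hr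
  omega

lemma pv_next_lt_ne (n : Int) (h : 0 < n) : (PySem.Int.floordiv n 10).toNat < n.toNat := by
  rw [PySem.Int.floordiv_eq_ediv_of_pos (by omega)]
  omega

-- loop invariant: joining the reversed digit list yields B's string, for any sufficient fuel
lemma pv_loop_invariant (fuel : Nat) : ∀ (n : Int) (digits : List String), n.toNat ≤ fuel →
    PySem.Str.join "" (pvLoopA fuel n digits).reverse =
      pvAltGo fuel n ++ PySem.Str.join "" digits.reverse := by
  induction fuel with
  | zero =>
    intro n digits hf
    simp [pvLoopA, pvAltGo]
  | succ fuel ih =>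
    intro n digits hf
    by_cases h : 0 < n
    · rw [pvLoopA, pvAltGo]
      rw [if_pos h, if_neg (by omega : ¬ n ≤ 0)]
      by_cases hr : PySem.Int.mod n 10 = 0
      · obtain ⟨h9, hqq⟩ := pv_step_rem_zero n h hr
        have hlt := pv_next_lt_zero n h hr
        rw [if_pos hr, ih _ _ (by omega), hqq, if_pos h9]
        simp only [if_true, List.reverse_append, List.reverse_cons, List.reverse_nil,
          List.nil_append, List.singleton_append, pv_join_cons, String.append_assoc]
      · obtain ⟨h9, hsucc, hqq⟩ := pv_step_rem_ne n h hr
        have h10 : PySem.Int.mod n 10 ≠ 10 := by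
          rw [PySem.Int.mod_eq_emod_of_pos (by omega)]; omega
        have hlt := pv_next_lt_ne n h
        rw [if_neg hr, ih _ _ (by omega), hqq, if_neg h10, if_neg h9, hsucc]
        simp only [List.reverse_append, List.reverse_cons, List.reverse_nil, List.nil_append,
          List.singleton_append, pv_join_cons, String.append_assoc]
    · rw [pvLoopA, pvAltGo]
      rw [if_neg h, if_pos (by omega : n ≤ 0)]
      simp [pv_join_nil]

lemma pv_slice_rev (digits : List String) :
    (PySem.List.slice? digits none none (-1)).getD [] = digits.reverse := by
  rw [PySem.List.slice?_none_none_neg_one]; rfl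

-- ===== VERDICT (by name: the statement is the Claim_ definition above) =====
theorem decimal_to_decimary_spec : Claim_equal_decimal_to_decimary := by
  intro n _
  unfold Spec_decimal_to_decimary decimal_to_decimary decimal_to_decimary_alt
  by_cases h0 : n = 0
  · subst h0
    simp [pvAltGo]
  · rw [if_neg h0, pv_slice_rev, pv_loop_invariant n.toNat n [] le_rfl]
    simp [pv_join_nil]
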